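-- pv_equiv track=rewrite | github.com/acme92/SCJ-TD-FD | DSCJ_smd.py | listAdj
-- ===== SOURCE A (Python) =====
-- def listAdj(genome):
-- 	adj_list = []
-- 	for chromosome in genome:
-- 		for gene_idx in range(len(chromosome) - 1):
-- 			if chromosome[gene_idx][0] == '-':
-- 				left = (chromosome[gene_idx][1:], 't')
-- 			else:
-- 				left = (chromosome[gene_idx], 'h')
-- 			if chromosome[gene_idx + 1][0] == '-':
-- 				right = (chromosome[gene_idx + 1][1:], 'h')
-- 			else:
-- 				right = (chromosome[gene_idx + 1], 't')
-- 			adj_list.append([left, right])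
-- 	return adj_list
-- ===== SOURCE B (Python) =====
-- def listAdj(genome):
--     adj_list = []
--     for chromosome in genome:
--         # pass 1: linearize the chromosome into its stream of gene extremities
--         # (for each gene, incoming extremity then outgoing extremity)
--         stream = []
--         for gene in chromosome:
--             if gene.startswith('-'):
--                 core = gene[1:]
--                 stream.append((core, 'h'))
--                 stream.append((core, 't'))
--             else:
--                 stream.append((gene, 't'))
--                 stream.append((gene, 'h'))
--         # pass 2: drop the two telomeric extremities and chunk the rest in twos
--         inner = stream[1:-1]
--         it = iter(inner)
--         for x, y in zip(it, it):
--             adj_list.append([x, y])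
--     return adj_list
-- ===== Notes on version B (the rewrite author's own statement) =====
-- stated objective: alternative
-- what changed: B linearizes each chromosome into its flat stream of gene extremities (incoming then outgoing per gene), strips the two telomeric extremities with a slice, and chunks the remaining stream into consecutive pairs, instead of A's index loop over gene positions that recomputes both extremities of an adjacency inline from chromosome[i] and chromosome[i+1].
import Mathlib
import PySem

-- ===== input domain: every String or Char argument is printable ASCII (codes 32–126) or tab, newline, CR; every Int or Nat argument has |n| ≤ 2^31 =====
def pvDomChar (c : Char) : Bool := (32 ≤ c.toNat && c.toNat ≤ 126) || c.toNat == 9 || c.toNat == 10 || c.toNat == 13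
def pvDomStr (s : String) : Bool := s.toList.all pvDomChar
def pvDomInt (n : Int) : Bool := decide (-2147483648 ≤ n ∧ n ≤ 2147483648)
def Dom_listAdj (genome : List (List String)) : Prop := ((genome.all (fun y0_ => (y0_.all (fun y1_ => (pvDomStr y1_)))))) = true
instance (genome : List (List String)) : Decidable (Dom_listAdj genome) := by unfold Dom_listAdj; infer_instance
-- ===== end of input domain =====

-- B linearizes each chromosome into its stream of gene extremities, slices off the two
-- telomeric ends and chunks the rest into consecutive pairs (objective: alternative algorithm).

-- ===== PORT A =====
-- one iteration of A's inner loop body at index i of chromosome c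
def pvPairA (c : List String) (i : Int) : List (String × String) :=
  let gl := PySem.List.pyGetD c i ""
  let gr := PySem.List.pyGetD c (i + 1) ""
  let left := if PySem.Str.pyGet? gl 0 = some '-' then (PySem.Str.slice gl (some 1) none, "t")
              else (gl, "h")
  let right := if PySem.Str.pyGet? gr 0 = some '-' then (PySem.Str.slice gr (some 1) none, "h")
               else (gr, "t")
  [left, right]

def listAdj (genome : List (List String)) : List (List (String × String)) :=
  genome.foldl (fun adj c =>
    (PySem.List.pyRange 0 ((c.length : Int) - 1) 1).foldl
      (fun adj2 i => adj2 ++ [pvPairA c i]) adj) []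

-- ===== PORT B =====
-- B's pass 1 body: the two extremities a gene contributes to the chromosome's
-- extremity stream, incoming extremity first, then outgoing
def pvExts (g : String) : List (String × String) :=
  if PySem.Str.startswith g "-" then
    let core := PySem.Str.slice g (some 1) none
    [(core, "h"), (core, "t")]
  else
    [(g, "t"), (g, "h")]

-- B's pass 2: 'zip(it, it)' chunking of the inner stream into consecutive pairs
def pvChunk2 : List (String × String) → List (List (String × String))
  | x :: y :: r => [x, y] :: pvChunk2 r
  | _ => []

def listAdj_alt (genome : List (List String)) : List (List (String × String)) :=
  genome.foldl (fun adj c =>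
    let stream := c.foldl (fun s g => s ++ pvExts g) []
    let inner := PySem.List.slice stream (some 1) (some (-1))
    adj ++ pvChunk2 inner) []

-- ===== PRECONDITION & SPEC =====
-- Pre_ excludes exactly the inputs on which Python A raises IndexError: a chromosome with at
-- least two genes containing the empty gene string "" (chromosome[i][0] is out of range there);
-- in chromosomes with fewer than two genes A never indexes into a gene, so "" is allowed there.
def Pre_listAdj (genome : List (List String)) : Prop :=
  ∀ c ∈ genome, 2 ≤ c.length → ∀ g ∈ c, g ≠ ""
instance (genome : List (List String)) : Decidable (Pre_listAdj genome) := by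
  unfold Pre_listAdj; infer_instance

def pvWitness_listAdj : List (List String) := [["a", "-bc", "d"], ["x"], [""]]

def Spec_listAdj (genome : List (List String)) (out : List (List (String × String))) : Prop := out = listAdj_alt genome
instance (genome : List (List String)) (out : List (List (String × String))) : Decidable (Spec_listAdj genome out) := by unfold Spec_listAdj; infer_instance

-- ===== CLAIM (what is proved, stated in full; the proofs are below) =====
def Claim_equal_listAdj : Prop := ∀ (genome : List (List String)), Dom_listAdj genome → Pre_listAdj genome → Spec_listAdj genome (listAdj genome)

-- ===== LEMMAS AND PROOFS =====

-- A's two inline branches, named (left = the gene's outgoing extremity, right = incoming)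
def pvL (g : String) : String × String :=
  if PySem.Str.pyGet? g 0 = some '-' then (PySem.Str.slice g (some 1) none, "t") else (g, "h")
def pvR (g : String) : String × String :=
  if PySem.Str.pyGet? g 0 = some '-' then (PySem.Str.slice g (some 1) none, "h") else (g, "t")

-- the common target: adjacencies of chromosome c as a map over gene positions
def pvT (c : List String) : List (List (String × String)) :=
  (List.range (c.length - 1)).map (fun k => [pvL (c.getD k ""), pvR (c.getD (k + 1) "")])

-- B's sign test agrees with A's: startswith '-' iff the first character exists and is '-'
theorem pv_startswith_dash (g : String) :
    (PySem.Str.startswith g "-") = (PySem.Str.pyGet? g 0 = some '-') := by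
  have h0 : PySem.Str.pyGet? g 0 = g.toList[(0:Nat)]? := by
    rw [show PySem.Str.pyGet? g 0 = PySem.List.pyGet? g.toList ((0:Nat):Int) from rfl,
      PySem.List.pyGet?_natCast]
  have h1 : PySem.Str.startswith g "-" = PySem.Chars.startswith g.toList ['-'] := by
    rw [PySem.Str.startswith]; congr 1
  rw [h0, h1]
  cases h : g.toList with
  | nil => simp [PySem.Chars.startswith]
  | cons c t =>
    by_cases hc : c = '-'
    · simp [PySem.Chars.startswith, List.isPrefixOf, hc]
    · simp [PySem.Chars.startswith, List.isPrefixOf, hc, Ne.symm hc]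

theorem pvExts_eq (g : String) : pvExts g = [pvR g, pvL g] := by
  simp only [pvExts, pv_startswith_dash, pvR, pvL]
  split_ifs with h <;> rfl

-- A's loop body at a natural index, written through pvL/pvR
theorem pvPairA_eq (c : List String) (k : Nat) :
    pvPairA c ((k : Nat) : Int) = [pvL (c.getD k ""), pvR (c.getD (k + 1) "")] := by
  have h1 : ((k : Int) + 1) = (((k + 1 : Nat) : Nat) : Int) := by push_cast; ring
  simp only [pvPairA, h1, PySem.List.pyGetD_natCast]
  rfl

-- A's per-chromosome loop appends exactly pvT c
theorem pvChromA_foldl (c : List String) (adj : List (List (String × String))) :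
    (PySem.List.pyRange 0 ((c.length : Int) - 1) 1).foldl
      (fun adj2 i => adj2 ++ [pvPairA c i]) adj = adj ++ pvT c := by
  rw [PySem.List.foldl_append_singleton_eq_map, PySem.List.pyRange_one]
  congr 1
  have ht : (((c.length : Int) - 1) - 0).toNat = c.length - 1 := by omega
  rw [ht, List.map_map]
  unfold pvT
  apply List.map_congr_left
  intro k _
  simp [Function.comp, pvPairA_eq]

-- xs[1:-1] is tail-then-dropLast
theorem pv_slice_inner {α : Type} (xs : List α) :
    PySem.List.slice xs (some 1) (some (-1)) = xs.tail.dropLast := by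
  simp only [PySem.List.slice, PySem.List.clampIdx]
  cases xs with
  | nil => rfl
  | cons a t =>
    simp only [List.tail_cons]
    norm_num
    rw [List.dropLast_eq_take]
    congr 1

-- chunking the carried extremity stream, gene by gene
def pvG (x : String × String) : List String → List (List (String × String))
  | [] => []
  | b :: t => [x, pvR b] :: pvG (pvL b) t

theorem pvChunk_carry (x : String × String) (c : List String) :
    pvChunk2 ((x :: c.flatMap pvExts).dropLast) = pvG x c := by
  induction c generalizing x with
  | nil => rfl
  | cons b t ih =>
    rw [List.flatMap_cons, pvExts_eq]
    show pvChunk2 ((x :: pvR b :: pvL b :: t.flatMap pvExts).dropLast) = pvG x (b :: t)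
    rw [show (x :: pvR b :: pvL b :: t.flatMap pvExts).dropLast
        = x :: pvR b :: (pvL b :: t.flatMap pvExts).dropLast from rfl]
    show [x, pvR b] :: pvChunk2 ((pvL b :: t.flatMap pvExts).dropLast) = pvG x (b :: t)
    rw [ih (pvL b)]
    rfl

theorem pvT_cons_cons (a b : String) (t : List String) :
    pvT (a :: b :: t) = [pvL a, pvR b] :: pvT (b :: t) := by
  unfold pvT
  have hlen : (a :: b :: t).length - 1 = ((b :: t).length - 1) + 1 := by simp
  rw [hlen, List.range_succ_eq_map]
  simp [List.map_map, Function.comp_def]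

theorem pvG_eq (c : List String) : ∀ a : String, pvG (pvL a) c = pvT (a :: c) := by
  induction c with
  | nil => intro a; rfl
  | cons b t ih =>
    intro a
    rw [pvT_cons_cons]
    show [pvL a, pvR b] :: pvG (pvL b) t = [pvL a, pvR b] :: pvT (b :: t)
    rw [ih b]

-- B's per-chromosome computation is exactly pvT c
theorem pvChromB_eq (c : List String) :
    pvChunk2 (PySem.List.slice (c.foldl (fun s g => s ++ pvExts g) []) (some 1) (some (-1)))
      = pvT c := by
  rw [show c.foldl (fun s g => s ++ pvExts g) [] = [] ++ c.flatMap pvExts from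
      PySem.List.foldl_append_eq_flatMap pvExts c [], List.nil_append, pv_slice_inner]
  cases c with
  | nil => rfl
  | cons a r =>
    rw [List.flatMap_cons, pvExts_eq]
    show pvChunk2 ((pvL a :: r.flatMap pvExts).dropLast) = pvT (a :: r)
    rw [pvChunk_carry, pvG_eq]

-- appending nature of B's fold
theorem pvFoldB (gs : List (List String)) (acc : List (List (String × String))) :
    gs.foldl (fun adj c =>
      let stream := c.foldl (fun s g => s ++ pvExts g) []
      let inner := PySem.List.slice stream (some 1) (some (-1))
      adj ++ pvChunk2 inner) acc
    = acc ++ gs.foldl (fun adj c =>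
      let stream := c.foldl (fun s g => s ++ pvExts g) []
      let inner := PySem.List.slice stream (some 1) (some (-1))
      adj ++ pvChunk2 inner) [] := by
  induction gs generalizing acc with
  | nil => simp
  | cons c gs ih =>
    simp only [List.foldl_cons]
    rw [ih, ih ([] ++ _), List.append_assoc]
    simp

-- A's fold equals acc ++ B's fold from []
theorem pvFoldAB (gs : List (List String)) (acc : List (List (String × String))) :
    gs.foldl (fun adj c =>
      (PySem.List.pyRange 0 ((c.length : Int) - 1) 1).foldl
        (fun adj2 i => adj2 ++ [pvPairA c i]) adj) acc
    = acc ++ gs.foldl (fun adj c =>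
      let stream := c.foldl (fun s g => s ++ pvExts g) []
      let inner := PySem.List.slice stream (some 1) (some (-1))
      adj ++ pvChunk2 inner) [] := by
  induction gs generalizing acc with
  | nil => simp
  | cons c gs ih =>
    simp only [List.foldl_cons]
    rw [pvChromA_foldl, ih, pvFoldB gs, List.append_assoc]
    have hc : pvT c = ([] : List (List (String × String))) ++
        pvChunk2 (PySem.List.slice (c.foldl (fun s g => s ++ pvExts g) []) (some 1) (some (-1))) := by
      rw [pvChromB_eq]; rfl
    rw [hc]
    simp

-- ===== VERDICT (by name: the statements are the Claim_ definitions above) =====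
theorem listAdj_spec : Claim_equal_listAdj := by
  intro genome _ _
  unfold Spec_listAdj listAdj listAdj_alt
  rw [pvFoldAB]
  simp
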